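-- pv_equiv track=rewrite | github.com/studiovoicetools/efro-agent | agent.py | _watchdog_subsystem
-- ===== SOURCE A (Python) =====
-- from typing import List, Optional, Dict, Any
--
-- def _watchdog_subsystem(failed_checks: list[dict[str, Any]]) -> str:
--     failed_names = {item["check_name"] for item in failed_checks}
--     if "public_health" in failed_names:
--         return "caddy-routing"
--     if "mcp_stream_disconnects" in failed_names:
--         return "mcp-stream"
--     if "brain_live_prod" in failed_names:
--         return "brain-live-prod"
--     if "local_health" in failed_names:
--         return "agent-runtime"
--     if "handoffs_api" in failed_names:
--         return "handoff-api"
--     if "chat_status_contract" in failed_names: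
--         return "chat-contract"
--     if "command_pwd_contract" in failed_names:
--         return "command-contract"
--     if "control_center_watchdog" in failed_names:
--         return "control-center-watchdog"
--     return "mixed-runtime"
-- ===== SOURCE B (Python) =====
-- _TABLE = {
--     "public_health": (0, "caddy-routing"),
--     "mcp_stream_disconnects": (1, "mcp-stream"),
--     "brain_live_prod": (2, "brain-live-prod"),
--     "local_health": (3, "agent-runtime"),
--     "handoffs_api": (4, "handoff-api"),
--     "chat_status_contract": (5, "chat-contract"),
--     "command_pwd_contract": (6, "command-contract"),
--     "control_center_watchdog": (7, "control-center-watchdog"),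
-- }
--
-- def _watchdog_subsystem(failed_checks):
--     best = None
--     for item in failed_checks:
--         entry = _TABLE.get(item["check_name"])
--         if entry is not None and (best is None or entry[0] < best[0]):
--             best = entry
--     return best[1] if best is not None else "mixed-runtime"
-- ===== Notes on version B (the rewrite author's own statement) =====
-- stated objective: simpler
-- what changed: Replaces the set-comprehension plus eight-branch if-chain with a single scan over the items that keeps the minimum-rank entry of a priority table, rendering the label (or 'mixed-runtime') at the end.
import Mathlib
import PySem

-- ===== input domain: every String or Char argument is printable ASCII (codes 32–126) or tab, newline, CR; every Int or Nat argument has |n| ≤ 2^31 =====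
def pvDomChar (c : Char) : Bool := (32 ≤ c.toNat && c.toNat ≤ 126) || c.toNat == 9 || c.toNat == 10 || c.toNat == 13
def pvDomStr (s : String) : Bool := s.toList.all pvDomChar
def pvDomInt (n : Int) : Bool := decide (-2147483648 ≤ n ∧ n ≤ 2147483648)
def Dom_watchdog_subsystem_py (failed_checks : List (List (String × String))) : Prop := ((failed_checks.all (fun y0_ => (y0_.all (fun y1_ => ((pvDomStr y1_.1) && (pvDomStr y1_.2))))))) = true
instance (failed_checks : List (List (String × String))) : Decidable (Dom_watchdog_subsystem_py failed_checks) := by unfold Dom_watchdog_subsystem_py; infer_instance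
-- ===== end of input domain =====

-- B replaces the set-comprehension + eight-branch if-chain by one scan keeping the
-- minimum-rank entry of a priority table (objective: simpler).

-- ===== PORT A =====
-- item["check_name"] raises KeyError when the key is missing; Pre_ excludes that, and under
-- Pre_ the total form (get? …).getD "" is exact.
def watchdog_subsystem_py (failed_checks : List (List (String × String))) : String :=
  let failed_names : PySem.Set String :=
    PySem.Set.ofList (failed_checks.map (fun item => ((PySem.Dict.mk item).get? "check_name").getD ""))
  if failed_names.contains "public_health" then "caddy-routing"
  else if failed_names.contains "mcp_stream_disconnects" then "mcp-stream"
  else if failed_names.contains "brain_live_prod" then "brain-live-prod"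
  else if failed_names.contains "local_health" then "agent-runtime"
  else if failed_names.contains "handoffs_api" then "handoff-api"
  else if failed_names.contains "chat_status_contract" then "chat-contract"
  else if failed_names.contains "command_pwd_contract" then "command-contract"
  else if failed_names.contains "control_center_watchdog" then "control-center-watchdog"
  else "mixed-runtime"

-- ===== PORT B =====
-- _TABLE.get(name) : the (rank, label) priority table of Source B
def wdRank? (name : String) : Option (Nat × String) :=
  if name = "public_health" then some (0, "caddy-routing")
  else if name = "mcp_stream_disconnects" then some (1, "mcp-stream")
  else if name = "brain_live_prod" then some (2, "brain-live-prod")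
  else if name = "local_health" then some (3, "agent-runtime")
  else if name = "handoffs_api" then some (4, "handoff-api")
  else if name = "chat_status_contract" then some (5, "chat-contract")
  else if name = "command_pwd_contract" then some (6, "command-contract")
  else if name = "control_center_watchdog" then some (7, "control-center-watchdog")
  else none

-- 'if entry is not None and (best is None or entry[0] < best[0]): best = entry'
def wdStep (best : Option (Nat × String)) (entry : Option (Nat × String)) : Option (Nat × String) :=
  match entry, best with
  | none, b => b
  | some e, none => some e
  | some e, some b => if e.1 < b.1 then some e else some b

def watchdog_subsystem_py_alt (failed_checks : List (List (String × String))) : String :=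
  let best :=
    failed_checks.foldl
      (fun best item => wdStep best (wdRank? (((PySem.Dict.mk item).get? "check_name").getD "")))
      none
  match best with
  | some b => b.2
  | none => "mixed-runtime"

-- ===== PRECONDITION & SPEC =====
-- Pre_ excludes items without a "check_name" key, on which the Python A (and B) raise KeyError.
def Pre_watchdog_subsystem_py (failed_checks : List (List (String × String))) : Prop :=
  ∀ item ∈ failed_checks, "check_name" ∈ item.map Prod.fst
instance (failed_checks : List (List (String × String))) : Decidable (Pre_watchdog_subsystem_py failed_checks) := by unfold Pre_watchdog_subsystem_py; infer_instance

def pvWitness_watchdog_subsystem_py : (List (List (String × String))) :=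
  [[("check_name", "local_health")], [("check_name", "other")]]

def Spec_watchdog_subsystem_py (failed_checks : List (List (String × String))) (out : String) : Prop := out = watchdog_subsystem_py_alt failed_checks
instance (failed_checks : List (List (String × String))) (out : String) : Decidable (Spec_watchdog_subsystem_py failed_checks out) := by unfold Spec_watchdog_subsystem_py; infer_instance

-- ===== CLAIM (what is proved, stated in full; the proofs are below) =====
def Claim_equal_watchdog_subsystem_py : Prop := ∀ (failed_checks : List (List (String × String))), Dom_watchdog_subsystem_py failed_checks → Pre_watchdog_subsystem_py failed_checks → Spec_watchdog_subsystem_py failed_checks (watchdog_subsystem_py failed_checks)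

-- ===== LEMMAS AND PROOFS =====

-- the best entry present in a list of names, in A's priority order
def wdChainE (ns : List String) : Option (Nat × String) :=
  if "public_health" ∈ ns then some (0, "caddy-routing")
  else if "mcp_stream_disconnects" ∈ ns then some (1, "mcp-stream")
  else if "brain_live_prod" ∈ ns then some (2, "brain-live-prod")
  else if "local_health" ∈ ns then some (3, "agent-runtime")
  else if "handoffs_api" ∈ ns then some (4, "handoff-api")
  else if "chat_status_contract" ∈ ns then some (5, "chat-contract")
  else if "command_pwd_contract" ∈ ns then some (6, "command-contract")
  else if "control_center_watchdog" ∈ ns then some (7, "control-center-watchdog")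
  else none

def wdRender : Option (Nat × String) → String
  | some b => b.2
  | none => "mixed-runtime"

theorem wdStep_none_right (b : Option (Nat × String)) : wdStep b none = b := rfl

theorem wdStep_some_none (e : Nat × String) : wdStep none (some e) = some e := rfl

theorem wdStep_some_some (b e : Nat × String) :
    wdStep (some b) (some e) = if e.1 < b.1 then some e else some b := rfl

theorem wdStep_assoc (b x y : Option (Nat × String)) :
    wdStep (wdStep b x) y = wdStep b (wdStep x y) := by
  rcases b with _ | b <;> rcases x with _ | x <;> rcases y with _ | y <;>
    simp only [wdStep_none_right, wdStep_some_none, wdStep_some_some] <;>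
    split_ifs <;>
    simp only [wdStep_none_right, wdStep_some_none, wdStep_some_some] <;>
    split_ifs <;> first | rfl | omega

theorem wdStep_none_left (z : Option (Nat × String)) : wdStep none z = z := by
  cases z <;> rfl

set_option maxHeartbeats 1000000 in
theorem wdChainE_cons (n : String) (t : List String) :
    wdChainE (n :: t) = wdStep (wdRank? n) (wdChainE t) := by
  by_cases h0 : n = "public_health"
  · subst h0; simp [wdChainE, wdRank?, List.mem_cons]; split_ifs <;> simp [wdStep]
  by_cases h1 : n = "mcp_stream_disconnects"
  · subst h1; simp [wdChainE, wdRank?, List.mem_cons]; split_ifs <;> simp [wdStep]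
  by_cases h2 : n = "brain_live_prod"
  · subst h2; simp [wdChainE, wdRank?, List.mem_cons]; split_ifs <;> simp [wdStep]
  by_cases h3 : n = "local_health"
  · subst h3; simp [wdChainE, wdRank?, List.mem_cons]; split_ifs <;> simp [wdStep]
  by_cases h4 : n = "handoffs_api"
  · subst h4; simp [wdChainE, wdRank?, List.mem_cons]; split_ifs <;> simp [wdStep]
  by_cases h5 : n = "chat_status_contract"
  · subst h5; simp [wdChainE, wdRank?, List.mem_cons]; split_ifs <;> simp [wdStep]
  by_cases h6 : n = "command_pwd_contract"
  · subst h6; simp [wdChainE, wdRank?, List.mem_cons]; split_ifs <;> simp [wdStep]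
  by_cases h7 : n = "control_center_watchdog"
  · subst h7; simp [wdChainE, wdRank?, List.mem_cons]; split_ifs <;> simp [wdStep]
  have h0' := Ne.symm h0; have h1' := Ne.symm h1; have h2' := Ne.symm h2
  have h3' := Ne.symm h3; have h4' := Ne.symm h4; have h5' := Ne.symm h5
  have h6' := Ne.symm h6; have h7' := Ne.symm h7
  simp [wdChainE, wdRank?, wdStep_none_left, List.mem_cons,
    h0, h1, h2, h3, h4, h5, h6, h7, h0', h1', h2', h3', h4', h5', h6', h7']

theorem wdContains_ofList (ns : List String) (x : String) :
    (PySem.Set.ofList ns).contains x = decide (x ∈ ns) := by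
  by_cases h : x ∈ ns <;>
    simp [PySem.Set.mem_ofList, h]

theorem wdA_eq_render (failed_checks : List (List (String × String))) :
    watchdog_subsystem_py failed_checks =
      wdRender (wdChainE (failed_checks.map (fun item => ((PySem.Dict.mk item).get? "check_name").getD ""))) := by
  unfold watchdog_subsystem_py
  simp only [wdContains_ofList, decide_eq_true_eq]
  unfold wdChainE wdRender
  split_ifs <;> rfl

-- ===== VERDICT (by name: the statement is the Claim_ definition above) =====
theorem wdFoldItems (fc : List (List (String × String))) (b : Option (Nat × String)) :
    fc.foldl (fun best item => wdStep best (wdRank? (((PySem.Dict.mk item).get? "check_name").getD ""))) b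
      = wdStep b (wdChainE (fc.map (fun item => ((PySem.Dict.mk item).get? "check_name").getD ""))) := by
  induction fc generalizing b with
  | nil => simp [wdChainE, wdStep]
  | cons it t ih =>
      simp only [List.foldl_cons, ih, List.map_cons, wdChainE_cons, wdStep_assoc]

theorem watchdog_subsystem_py_spec : Claim_equal_watchdog_subsystem_py := by
  intro fc _ _
  unfold Spec_watchdog_subsystem_py watchdog_subsystem_py_alt
  rw [wdA_eq_render]
  show _ = wdRender _
  rw [wdFoldItems, wdStep_none_left]
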